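-- pv_equiv track=rewrite | github.com/Esmanuryz/Algorithm-Implementations | question5.py | dynamic_array_simulation
-- ===== SOURCE A (Python) =====
-- def dynamic_array_simulation(operations):
--     array = []
--     capacity = 1
--     result = []
--
--     for operation in operations:
--         if len(array) == capacity:
--             capacity *= 2
--         array.append(operation)
--         result.append((len(array), capacity)) # creates tuple
--
--     return result
-- ===== SOURCE B (Python) =====
-- def dynamic_array_simulation(operations):
--     return [(i + 1, 2 ** i.bit_length()) for i, _ in enumerate(operations)]
-- ===== Notes on version B (the rewrite author's own statement) =====
-- stated objective: simpler
-- what changed: Replaces the array/capacity doubling state machine with a stateless per-element closed form: the i-th entry is (i+1, 2**i.bit_length()), the smallest power of two covering i+1 elements.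
import Mathlib
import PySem

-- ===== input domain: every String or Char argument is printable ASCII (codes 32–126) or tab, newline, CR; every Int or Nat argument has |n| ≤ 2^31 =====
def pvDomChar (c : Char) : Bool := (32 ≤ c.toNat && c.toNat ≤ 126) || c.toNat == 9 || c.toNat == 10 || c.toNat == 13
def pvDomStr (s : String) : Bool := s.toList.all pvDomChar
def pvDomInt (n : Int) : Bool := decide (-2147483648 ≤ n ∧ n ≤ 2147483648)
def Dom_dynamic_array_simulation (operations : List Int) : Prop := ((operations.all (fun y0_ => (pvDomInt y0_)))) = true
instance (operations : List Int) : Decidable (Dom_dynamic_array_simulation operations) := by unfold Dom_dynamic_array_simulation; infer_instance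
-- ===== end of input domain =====

-- B drops A's array/capacity doubling state machine for a stateless closed form per index (simpler; same O(n) cost).

-- ===== PORT A =====
-- one loop iteration of A: state is (array, capacity, result)
def pvStepA (st : List Int × Int × List (Int × Int)) (operation : Int) :
    List Int × Int × List (Int × Int) :=
  let array := st.1
  let capacity := st.2.1
  let result := st.2.2
  let capacity := if ((array.length : Int) == capacity) then capacity * 2 else capacity
  let array := array ++ [operation]
  (array, capacity, result ++ [((array.length : Int), capacity)])

def dynamic_array_simulation (operations : List Int) : List (Int × Int) :=
  (operations.foldl pvStepA ([], 1, [])).2.2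

-- ===== PORT B =====
def dynamic_array_simulation_alt (operations : List Int) : List (Int × Int) :=
  (PySem.List.enumerate operations).map (fun p => (p.1 + 1, 2 ^ PySem.Int.bitLength p.1))

-- ===== PRECONDITION & SPEC =====
def Spec_dynamic_array_simulation (operations : List Int) (out : List (Int × Int)) : Prop := out = dynamic_array_simulation_alt operations
instance (operations : List Int) (out : List (Int × Int)) : Decidable (Spec_dynamic_array_simulation operations out) := by unfold Spec_dynamic_array_simulation; infer_instance

-- ===== CLAIM (what is proved, stated in full; the proofs are below) =====
def Claim_equal_dynamic_array_simulation : Prop := ∀ (operations : List Int), Dom_dynamic_array_simulation operations → Spec_dynamic_array_simulation operations (dynamic_array_simulation operations)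

-- ===== LEMMAS AND PROOFS =====

-- capacity held by A's loop after n appends
def capOf (n : Nat) : Int :=
  if n = 0 then 1 else 2 ^ PySem.Int.bitLength ((n - 1 : Nat) : Int)

lemma capOf_succ (n : Nat) : capOf (n + 1) = 2 ^ PySem.Int.bitLength (n : Int) := by
  simp [capOf]

lemma capStep (n : Nat) :
    (if ((n : Int) = capOf n) then capOf n * 2 else capOf n)
      = 2 ^ PySem.Int.bitLength (n : Int) := by
  cases n with
  | zero => decide
  | succ m =>
    rw [capOf_succ]
    have hm : m < 2 ^ PySem.Int.bitLength (m : Int) := by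
      simpa using PySem.Int.lt_two_pow_bitLength (m : Int)
    have hL1 : m + 1 < 2 ^ PySem.Int.bitLength ((m + 1 : Nat) : Int) := by
      simpa using PySem.Int.lt_two_pow_bitLength ((m + 1 : Nat) : Int)
    have hL2 : 2 ^ (PySem.Int.bitLength ((m + 1 : Nat) : Int) - 1) ≤ m + 1 := by
      simpa using PySem.Int.two_pow_bitLength_le ((m + 1 : Nat) : Int) (by positivity)
    by_cases h : ((m + 1 : Nat) : Int) = 2 ^ PySem.Int.bitLength (m : Int)
    · rw [if_pos h]
      have h' : m + 1 = 2 ^ PySem.Int.bitLength (m : Int) := by exact_mod_cast h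
      have hlt : PySem.Int.bitLength (m : Int) < PySem.Int.bitLength ((m + 1 : Nat) : Int) := by
        have : (2:Nat) ^ PySem.Int.bitLength (m : Int) < 2 ^ PySem.Int.bitLength ((m + 1 : Nat) : Int) := by
          omega
        exact (Nat.pow_lt_pow_iff_right (by norm_num)).mp this
      have hle : PySem.Int.bitLength ((m + 1 : Nat) : Int) - 1 ≤ PySem.Int.bitLength (m : Int) := by
        have : (2:Nat) ^ (PySem.Int.bitLength ((m + 1 : Nat) : Int) - 1) ≤ 2 ^ PySem.Int.bitLength (m : Int) := by
          omega
        exact (Nat.pow_le_pow_iff_right (by norm_num)).mp this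
      have hEq : PySem.Int.bitLength ((m + 1 : Nat) : Int) = PySem.Int.bitLength (m : Int) + 1 := by
        omega
      rw [hEq, pow_succ]
    · rw [if_neg h]
      have h' : m + 1 ≠ 2 ^ PySem.Int.bitLength (m : Int) := by
        intro hc; exact h (by exact_mod_cast hc)
      have hm0 : m ≠ 0 := by
        intro hc; subst hc; simp at h'
      have hK2 : 2 ^ (PySem.Int.bitLength (m : Int) - 1) ≤ m := by
        simpa using PySem.Int.two_pow_bitLength_le (m : Int) (by exact_mod_cast hm0)
      have h1 : PySem.Int.bitLength ((m + 1 : Nat) : Int) - 1 < PySem.Int.bitLength (m : Int) := by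
        have : (2:Nat) ^ (PySem.Int.bitLength ((m + 1 : Nat) : Int) - 1) < 2 ^ PySem.Int.bitLength (m : Int) := by
          omega
        exact (Nat.pow_lt_pow_iff_right (by norm_num)).mp this
      have h2 : PySem.Int.bitLength (m : Int) - 1 < PySem.Int.bitLength ((m + 1 : Nat) : Int) := by
        have : (2:Nat) ^ (PySem.Int.bitLength (m : Int) - 1) < 2 ^ PySem.Int.bitLength ((m + 1 : Nat) : Int) := by
          omega
        exact (Nat.pow_lt_pow_iff_right (by norm_num)).mp this
      have hm1 : 1 ≤ PySem.Int.bitLength (m : Int) := by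
        by_contra hc
        have : PySem.Int.bitLength (m : Int) = 0 := by omega
        rw [this] at hm; simp at hm; omega
      have hEq : PySem.Int.bitLength ((m + 1 : Nat) : Int) = PySem.Int.bitLength (m : Int) := by
        omega
      rw [hEq]

lemma foldA_eq (ops : List Int) : ∀ (arr : List Int) (res : List (Int × Int)),
    (List.foldl pvStepA (arr, capOf arr.length, res) ops).2.2
      = res ++ (List.range ops.length).map
          (fun (j : Nat) => ((arr.length + j + 1 : Int),
                     (2 : Int) ^ PySem.Int.bitLength ((arr.length + j : Nat) : Int))) := by
  induction ops with
  | nil => intro arr res; simp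
  | cons op t ih =>
    intro arr res
    have hstep : pvStepA (arr, capOf arr.length, res) op
        = (arr ++ [op], capOf (arr.length + 1),
           res ++ [((arr.length + 1 : Int), capOf (arr.length + 1))]) := by
      have hc := capStep arr.length
      simp only [pvStepA, beq_iff_eq]
      rw [hc, capOf_succ]
      simp
    rw [List.foldl_cons, hstep]
    have hlen : capOf (arr.length + 1) = capOf ((arr ++ [op]).length) := by simp
    rw [hlen, ih (arr ++ [op])]
    simp only [List.length_append, List.length_cons, List.length_nil,
      List.append_assoc, List.cons_append, List.nil_append, capOf_succ]
    congr 1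
    rw [List.range_succ_eq_map, List.map_cons, List.map_map]
    congr 1
    apply List.map_congr_left
    intro j _
    simp only [Function.comp, Nat.succ_eq_add_one, Prod.mk.injEq]
    constructor
    · push_cast; ring
    · have h2 : arr.length + 1 + j = arr.length + (j + 1) := by omega
      rw [h2]

lemma enumB_eq (t : List Int) : ∀ (s : Nat),
    (PySem.List.enumerate t (s : Int)).map
        (fun p => (p.1 + 1, (2:Int) ^ PySem.Int.bitLength p.1))
      = (List.range t.length).map
          (fun (j : Nat) => ((s + j + 1 : Int), (2 : Int) ^ PySem.Int.bitLength ((s + j : Nat) : Int))) := by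
  induction t with
  | nil => intro s; simp [PySem.List.enumerate_nil]
  | cons x xs ih =>
    intro s
    rw [PySem.List.enumerate_cons, List.map_cons]
    have : ((s : Int) + 1) = ((s + 1 : Nat) : Int) := by push_cast; ring
    rw [this, ih (s + 1)]
    simp only [List.length_cons]
    rw [List.range_succ_eq_map, List.map_cons, List.map_map]
    congr 1
    apply List.map_congr_left
    intro j _
    simp only [Function.comp, Nat.succ_eq_add_one, Prod.mk.injEq]
    constructor
    · push_cast; ring
    · have h2 : s + 1 + j = s + (j + 1) := by omega
      rw [h2]

lemma altB_eq (ops : List Int) :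
    dynamic_array_simulation_alt ops
      = (List.range ops.length).map
          (fun (j : Nat) => ((j + 1 : Int), (2 : Int) ^ PySem.Int.bitLength ((j : Nat) : Int))) := by
  unfold dynamic_array_simulation_alt
  have := enumB_eq ops 0
  simpa using this

-- ===== VERDICT (by name: the statement is the Claim_ definition above) =====
theorem dynamic_array_simulation_spec : Claim_equal_dynamic_array_simulation := by
  intro ops _
  unfold Spec_dynamic_array_simulation dynamic_array_simulation
  have h := foldA_eq ops [] []
  simp [capOf] at h
  rw [h, altB_eq]
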